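-- pv_equiv track=rewrite | github.com/ReNothingg/Olimpiada | TheFirstStage/D.py | to_first_from_second
-- ===== SOURCE A (Python) =====
-- def is_lower_a_to_y(ch):
--     return 'a' <= ch <= 'y'
--
-- def to_first_from_second(s):
--     words = []
--     i = 0
--     n = len(s)
--
--     j = i
--     while j < n and is_lower_a_to_y(s[j]):
--         j += 1
--     words.append(s[i:j].upper())
--     i = j
--     while i < n:
--         j = i + 1
--         while j < n and is_lower_a_to_y(s[j]):
--             j += 1
--         words.append(s[i:j].upper())
--         i = j
--     return '-'.join(words)
-- ===== SOURCE B (Python) =====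
-- def to_first_from_second(s):
--     pieces = []
--     for ch in s:
--         if not ('a' <= ch <= 'y'):
--             pieces.append('-')
--         pieces.append(ch.upper())
--     return ''.join(pieces)
-- ===== Notes on version B (the rewrite author's own statement) =====
-- stated objective: simpler
-- what changed: Replaces A's segment-collecting nested while loops (slice each maximal run, upper it, join with '-') by a single character-level pass that emits '-' before every char outside 'a'..'y' and the uppercased char itself.
import Mathlib
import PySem

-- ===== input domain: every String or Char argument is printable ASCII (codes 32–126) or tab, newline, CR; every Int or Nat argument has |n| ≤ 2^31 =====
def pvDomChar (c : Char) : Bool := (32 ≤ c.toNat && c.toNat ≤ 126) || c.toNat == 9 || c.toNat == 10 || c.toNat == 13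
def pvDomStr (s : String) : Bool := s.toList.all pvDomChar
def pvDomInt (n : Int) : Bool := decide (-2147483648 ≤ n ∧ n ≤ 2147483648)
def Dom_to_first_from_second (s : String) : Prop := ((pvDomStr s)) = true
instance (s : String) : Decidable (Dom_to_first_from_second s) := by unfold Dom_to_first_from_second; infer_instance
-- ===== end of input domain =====

-- B replaces A's segment-collect-and-join loops by one char-level pass (objective: simpler).

-- ===== PORT A =====
-- strings are modelled as List Char internally (PySem.Chars is exact on the ASCII domain)
def is_lower_a_to_y (ch : Char) : Bool := decide ('a' ≤ ch ∧ ch ≤ 'y')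

-- inner `while j < n and is_lower_a_to_y(s[j])` together with the slice s[i:j]:
-- returns (the scanned run, the remainder)
def aRun : List Char → List Char × List Char
  | [] => ([], [])
  | c :: rest =>
    if is_lower_a_to_y c then
      let p := aRun rest
      (c :: p.1, p.2)
    else ([], c :: rest)

theorem aRun_snd_length_le (l : List Char) : (aRun l).2.length ≤ l.length := by
  induction l with
  | nil => simp [aRun]
  | cons c rest ih =>
    simp only [aRun]
    split
    · simpa using Nat.le_succ_of_le ih
    · simp

-- outer `while i < n: …` loop, accumulating the words list
def aLoop : List Char → List (List Char) → List (List Char)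
  | [], words => words
  | c :: rest, words =>
    let p := aRun rest
    aLoop p.2 (words ++ [PySem.Chars.upper (c :: p.1)])
termination_by l => l.length
decreasing_by
  exact Nat.lt_succ_of_le (aRun_snd_length_le rest)

def to_first_from_second (s : String) : String :=
  String.ofList (PySem.Chars.join ['-']
    (aLoop (aRun s.toList).2 [PySem.Chars.upper (aRun s.toList).1]))

-- ===== PORT B =====
def to_first_from_second_alt (s : String) : String :=
  String.ofList <| s.toList.foldl
    (fun pieces ch =>
      if ¬ ('a' ≤ ch ∧ ch ≤ 'y') then pieces ++ ['-', PySem.Chars.upperChar ch]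
      else pieces ++ [PySem.Chars.upperChar ch]) []

-- ===== PRECONDITION & SPEC =====
def Spec_to_first_from_second (s : String) (out : String) : Prop := out = to_first_from_second_alt s
instance (s : String) (out : String) : Decidable (Spec_to_first_from_second s out) := by unfold Spec_to_first_from_second; infer_instance

-- ===== CLAIM (what is proved, stated in full; the proofs are below) =====
def Claim_equal_to_first_from_second : Prop := ∀ (s : String), Dom_to_first_from_second s → Spec_to_first_from_second s (to_first_from_second s)

-- ===== LEMMAS AND PROOFS =====

-- what B emits for one character
def bEmit (ch : Char) : List Char :=
  if ¬ ('a' ≤ ch ∧ ch ≤ 'y') then ['-', PySem.Chars.upperChar ch] else [PySem.Chars.upperChar ch]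

theorem bFoldl_eq_flatMap (cs : List Char) (acc : List Char) :
    cs.foldl (fun pieces ch =>
      if ¬ ('a' ≤ ch ∧ ch ≤ 'y') then pieces ++ ['-', PySem.Chars.upperChar ch]
      else pieces ++ [PySem.Chars.upperChar ch]) acc = acc ++ cs.flatMap bEmit := by
  induction cs generalizing acc with
  | nil => simp
  | cons c rest ih =>
    rw [List.foldl_cons, ih]
    simp only [List.flatMap_cons, bEmit]
    split <;> simp

theorem aRun_append (l : List Char) : (aRun l).1 ++ (aRun l).2 = l := by
  induction l with
  | nil => simp [aRun]
  | cons c rest ih =>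
    simp only [aRun]
    split
    · simpa using ih
    · simp

theorem aRun_fst_all (l : List Char) : ∀ c ∈ (aRun l).1, is_lower_a_to_y c = true := by
  induction l with
  | nil => simp [aRun]
  | cons c rest ih =>
    simp only [aRun]
    split
    · next h =>
      intro x hx
      rcases List.mem_cons.mp hx with rfl | hx
      · exact h
      · exact ih x hx
    · simp

theorem aRun_snd_head (l : List Char) :
    ∀ c rest, (aRun l).2 = c :: rest → is_lower_a_to_y c = false := by
  induction l with
  | nil => simp [aRun]
  | cons c rest ih =>
    simp only [aRun]
    split
    · exact ih
    · next h =>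
      intro x r hx
      simp only [List.cons.injEq] at hx
      obtain ⟨rfl, -⟩ := hx
      simpa using h

theorem bEmit_of_ay (c : Char) (h : is_lower_a_to_y c = true) :
    bEmit c = [PySem.Chars.upperChar c] := by
  simp only [is_lower_a_to_y, decide_eq_true_eq] at h
  simp [bEmit, h]

theorem bEmit_of_not_ay (c : Char) (h : is_lower_a_to_y c = false) :
    bEmit c = ['-', PySem.Chars.upperChar c] := by
  simp only [is_lower_a_to_y, decide_eq_false_iff_not] at h
  simp [bEmit, h]

theorem flatMap_bEmit_of_all_ay (l : List Char) (h : ∀ c ∈ l, is_lower_a_to_y c = true) :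
    l.flatMap bEmit = PySem.Chars.upper l := by
  induction l with
  | nil => simp [PySem.Chars.upper]
  | cons c rest ih =>
    rw [List.flatMap_cons, bEmit_of_ay c (h c (List.mem_cons_self))]
    have : rest.flatMap bEmit = PySem.Chars.upper rest := ih (fun x hx => h x (List.mem_cons_of_mem _ hx))
    simp [PySem.Chars.upper, this]

theorem join_append_singleton (sep : List Char) (ws : List (List Char)) (w : List Char)
    (h : ws ≠ []) :
    PySem.Chars.join sep (ws ++ [w]) = PySem.Chars.join sep ws ++ sep ++ w := by
  induction ws with
  | nil => exact absurd rfl h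
  | cons a ws ih =>
    cases ws with
    | nil => simp [PySem.Chars.join_cons_cons, PySem.Chars.join_singleton]
    | cons b ws =>
      have h2 : a :: (b :: ws) ++ [w] = a :: b :: (ws ++ [w]) := by simp
      rw [h2, PySem.Chars.join_cons_cons, PySem.Chars.join_cons_cons,
        show b :: (ws ++ [w]) = (b :: ws) ++ [w] from rfl, ih (by simp)]
      simp

-- the outer loop, joined, equals the remaining characters' flat emission
theorem aLoop_join (n : Nat) : ∀ (rest : List Char), rest.length ≤ n →
    (∀ c r, rest = c :: r → is_lower_a_to_y c = false) →
    ∀ words, words ≠ [] →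
      PySem.Chars.join ['-'] (aLoop rest words) =
        PySem.Chars.join ['-'] words ++ rest.flatMap bEmit := by
  induction n with
  | zero =>
    intro rest hn _ words _
    rw [List.length_eq_zero_iff.mp (Nat.le_zero.mp hn)]
    simp [aLoop]
  | succ n ih =>
    intro rest hn hhead words hw
    cases rest with
    | nil => simp [aLoop]
    | cons c rest =>
      rw [aLoop]
      have hlen : (aRun rest).2.length ≤ n :=
        le_trans (aRun_snd_length_le rest) (Nat.le_of_succ_le_succ hn)
      rw [ih (aRun rest).2 hlen (aRun_snd_head rest)
        (words ++ [PySem.Chars.upper (c :: (aRun rest).1)]) (by simp),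
        join_append_singleton _ _ _ hw]
      have hsplit : (c :: rest).flatMap bEmit
          = bEmit c ++ (aRun rest).1.flatMap bEmit ++ (aRun rest).2.flatMap bEmit := by
        conv_lhs => rw [← aRun_append rest]
        simp
      rw [hsplit, bEmit_of_not_ay c (hhead c rest rfl),
        flatMap_bEmit_of_all_ay _ (aRun_fst_all rest)]
      simp [PySem.Chars.upper]

-- ===== VERDICT (by name: the statement is the Claim_ definition above) =====
theorem to_first_from_second_spec : Claim_equal_to_first_from_second := by
  intro s _
  show to_first_from_second s = to_first_from_second_alt s
  unfold to_first_from_second to_first_from_second_alt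
  rw [bFoldl_eq_flatMap]
  have h := aLoop_join (aRun s.toList).2.length (aRun s.toList).2 le_rfl
    (aRun_snd_head s.toList) [PySem.Chars.upper (aRun s.toList).1] (by simp)
  rw [h, PySem.Chars.join_singleton]
  conv_rhs => rw [← aRun_append s.toList]
  rw [List.flatMap_append, flatMap_bEmit_of_all_ay _ (aRun_fst_all s.toList)]
  simp
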